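-- pv_equiv track=rewrite | github.com/bouclem/ai-lang | libs/nlp/text_processing.py | pos_tag
-- ===== SOURCE A (Python) =====
-- from typing import List, Dict, Tuple, Optional, Set
--
-- def pos_tag(tokens: List[str]) -> List[Tuple[str, str]]:
--     """Étiquetage morpho-syntaxique simple."""
--     tagged = []
--
--     # Dictionnaire simple de tags POS
--     pos_dict = {
--         # Pronoms
--         'i': 'PRP', 'you': 'PRP', 'he': 'PRP', 'she': 'PRP', 'it': 'PRP',
--         'we': 'PRP', 'they': 'PRP', 'me': 'PRP', 'him': 'PRP', 'her': 'PRP',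
--         'us': 'PRP', 'them': 'PRP',
--
--         # Déterminants
--         'the': 'DT', 'a': 'DT', 'an': 'DT', 'this': 'DT', 'that': 'DT',
--         'these': 'DT', 'those': 'DT',
--
--         # Prépositions
--         'in': 'IN', 'on': 'IN', 'at': 'IN', 'by': 'IN', 'for': 'IN',
--         'with': 'IN', 'to': 'IN', 'from': 'IN', 'of': 'IN', 'about': 'IN',
--
--         # Conjonctions
--         'and': 'CC', 'or': 'CC', 'but': 'CC', 'so': 'CC',
--
--         # Verbes auxiliaires
--         'is': 'VBZ', 'are': 'VBP', 'was': 'VBD', 'were': 'VBD',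
--         'have': 'VBP', 'has': 'VBZ', 'had': 'VBD',
--         'will': 'MD', 'would': 'MD', 'can': 'MD', 'could': 'MD',
--         'should': 'MD', 'may': 'MD', 'might': 'MD'
--     }
--
--     for token in tokens:
--         token_lower = token.lower()
--
--         if token_lower in pos_dict:
--             tagged.append((token, pos_dict[token_lower]))
--         elif token.isdigit():
--             tagged.append((token, 'CD'))  # Cardinal number
--         elif token.endswith('ing'):
--             tagged.append((token, 'VBG'))  # Gerund
--         elif token.endswith('ed'):
--             tagged.append((token, 'VBD'))  # Past tense verb
--         elif token.endswith('ly'):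
--             tagged.append((token, 'RB'))   # Adverb
--         elif token.endswith('s') and len(token) > 3:
--             tagged.append((token, 'NNS'))  # Plural noun
--         elif token[0].isupper():
--             tagged.append((token, 'NNP'))  # Proper noun
--         else:
--             tagged.append((token, 'NN'))   # Noun
--
--     return tagged
-- ===== SOURCE B (Python) =====
-- from typing import List, Tuple
--
-- POS_DICT = {
--     'i': 'PRP', 'you': 'PRP', 'he': 'PRP', 'she': 'PRP', 'it': 'PRP',
--     'we': 'PRP', 'they': 'PRP', 'me': 'PRP', 'him': 'PRP', 'her': 'PRP',
--     'us': 'PRP', 'them': 'PRP',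
--     'the': 'DT', 'a': 'DT', 'an': 'DT', 'this': 'DT', 'that': 'DT',
--     'these': 'DT', 'those': 'DT',
--     'in': 'IN', 'on': 'IN', 'at': 'IN', 'by': 'IN', 'for': 'IN',
--     'with': 'IN', 'to': 'IN', 'from': 'IN', 'of': 'IN', 'about': 'IN',
--     'and': 'CC', 'or': 'CC', 'but': 'CC', 'so': 'CC',
--     'is': 'VBZ', 'are': 'VBP', 'was': 'VBD', 'were': 'VBD',
--     'have': 'VBP', 'has': 'VBZ', 'had': 'VBD',
--     'will': 'MD', 'would': 'MD', 'can': 'MD', 'could': 'MD',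
--     'should': 'MD', 'may': 'MD', 'might': 'MD'
-- }
--
-- # Whole-list overlay passes, applied from LOWEST priority upward; each later
-- # pass overwrites the tags of the tokens it matches, so the final tag of a
-- # token is its highest-priority matching rule (the dict pass runs last).
-- OVERLAYS = [
--     ('NNP', lambda t: t[0].isupper()),
--     ('NNS', lambda t: t.endswith('s') and len(t) > 3),
--     ('RB',  lambda t: t.endswith('ly')),
--     ('VBD', lambda t: t.endswith('ed')),
--     ('VBG', lambda t: t.endswith('ing')),
--     ('CD',  lambda t: t.isdigit()),
-- ]
--
-- def pos_tag(tokens: List[str]) -> List[Tuple[str, str]]: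
--     tags = ['NN'] * len(tokens)
--     for tag, pred in OVERLAYS:
--         for i, t in enumerate(tokens):
--             if pred(t):
--                 tags[i] = tag
--     for i, t in enumerate(tokens):
--         tags[i] = POS_DICT.get(t.lower(), tags[i])
--     return list(zip(tokens, tags))
-- ===== Notes on version B (the rewrite author's own statement) =====
-- stated objective: alternative
-- what changed: Replaces A's per-token first-match elif chain by rule-major staged passes: tags start as 'NN', each whole-list overlay pass (applied in reverse priority order) overwrites matching tokens' tags, the dict pass runs last, and the result is zip(tokens, tags).
import Mathlib
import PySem

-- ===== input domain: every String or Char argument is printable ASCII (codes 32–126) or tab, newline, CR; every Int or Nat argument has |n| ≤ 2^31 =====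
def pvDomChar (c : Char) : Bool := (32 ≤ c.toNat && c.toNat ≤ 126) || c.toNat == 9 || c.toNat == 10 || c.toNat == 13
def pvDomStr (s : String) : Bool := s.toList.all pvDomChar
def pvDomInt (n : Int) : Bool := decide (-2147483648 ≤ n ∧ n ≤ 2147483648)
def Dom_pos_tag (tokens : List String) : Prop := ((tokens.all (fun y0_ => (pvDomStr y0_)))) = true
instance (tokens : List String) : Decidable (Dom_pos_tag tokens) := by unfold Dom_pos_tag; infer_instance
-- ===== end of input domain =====

-- B replaces A's per-token first-match elif chain by rule-major staged overlay
-- passes (reverse priority, later passes overwrite, dict pass last) and zips;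
-- equivalence is proved on token lists without the empty token (A raises there).

-- shared module-level POS dictionary (A builds it inline each call, B hoists it; same data)
def posDict : PySem.Dict String String := PySem.Dict.ofList [
  ("i", "PRP"), ("you", "PRP"), ("he", "PRP"), ("she", "PRP"), ("it", "PRP"),
  ("we", "PRP"), ("they", "PRP"), ("me", "PRP"), ("him", "PRP"), ("her", "PRP"),
  ("us", "PRP"), ("them", "PRP"),
  ("the", "DT"), ("a", "DT"), ("an", "DT"), ("this", "DT"), ("that", "DT"),
  ("these", "DT"), ("those", "DT"),
  ("in", "IN"), ("on", "IN"), ("at", "IN"), ("by", "IN"), ("for", "IN"),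
  ("with", "IN"), ("to", "IN"), ("from", "IN"), ("of", "IN"), ("about", "IN"),
  ("and", "CC"), ("or", "CC"), ("but", "CC"), ("so", "CC"),
  ("is", "VBZ"), ("are", "VBP"), ("was", "VBD"), ("were", "VBD"),
  ("have", "VBP"), ("has", "VBZ"), ("had", "VBD"),
  ("will", "MD"), ("would", "MD"), ("can", "MD"), ("could", "MD"),
  ("should", "MD"), ("may", "MD"), ("might", "MD")]

-- ===== PORT A =====
def pos_tag (tokens : List String) : List (String × String) :=
  tokens.foldl (fun tagged token =>
    let token_lower := PySem.Str.lower token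
    if posDict.contains token_lower then
      tagged ++ [(token, posDict.getD token_lower "")]
    else if PySem.Str.strIsdigit token then
      tagged ++ [(token, "CD")]
    else if PySem.Str.endswith token "ing" then
      tagged ++ [(token, "VBG")]
    else if PySem.Str.endswith token "ed" then
      tagged ++ [(token, "VBD")]
    else if PySem.Str.endswith token "ly" then
      tagged ++ [(token, "RB")]
    else if PySem.Str.endswith token "s" && decide (3 < PySem.Str.len token) then
      tagged ++ [(token, "NNS")]
    else
      match PySem.Str.pyGet? token 0 with   -- token[0]: none = IndexError, excluded by Pre_
      | some c => if PySem.Chars.isupper c then tagged ++ [(token, "NNP")]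
                  else tagged ++ [(token, "NN")]
      | none => tagged ++ [(token, "NN")]) []

-- ===== PORT B =====
-- Source B's OVERLAYS: whole-list passes applied lowest priority first, each overwriting
def posOverlays : List (String × (String → Bool)) := [
  ("NNP", fun t => match PySem.Str.pyGet? t 0 with   -- t[0]: none = IndexError, excluded by Pre_
                   | some c => PySem.Chars.isupper c
                   | none => false),
  ("NNS", fun t => PySem.Str.endswith t "s" && decide (3 < PySem.Str.len t)),
  ("RB",  fun t => PySem.Str.endswith t "ly"),
  ("VBD", fun t => PySem.Str.endswith t "ed"),
  ("VBG", fun t => PySem.Str.endswith t "ing"),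
  ("CD",  fun t => PySem.Str.strIsdigit t)]

def pos_tag_alt (tokens : List String) : List (String × String) :=
  -- tags = ['NN'] * len(tokens)
  let tags0 := tokens.map (fun _ => "NN")
  -- for tag, pred in OVERLAYS: for i, t in enumerate(tokens): if pred(t): tags[i] = tag
  let tags1 := posOverlays.foldl (fun tags tp =>
      (tokens.zip tags).map (fun p => if tp.2 p.1 then tp.1 else p.2)) tags0
  -- for i, t in enumerate(tokens): tags[i] = POS_DICT.get(t.lower(), tags[i])
  let tags2 := (tokens.zip tags1).map (fun p => (posDict.get? (PySem.Str.lower p.1)).getD p.2)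
  -- return list(zip(tokens, tags))
  tokens.zip tags2

-- ===== PRECONDITION & SPEC =====
-- Pre_ excludes lists containing the empty token, on which A (and B alike) raises IndexError at token[0].
def Pre_pos_tag (tokens : List String) : Prop := "" ∉ tokens
instance (tokens : List String) : Decidable (Pre_pos_tag tokens) := by unfold Pre_pos_tag; infer_instance
def pvWitness_pos_tag : List String := ["The", "cats", "ran", "quickly", "to", "7", "trees"]
def Spec_pos_tag (tokens : List String) (out : List (String × String)) : Prop := out = pos_tag_alt tokens
instance (tokens : List String) (out : List (String × String)) : Decidable (Spec_pos_tag tokens out) := by unfold Spec_pos_tag; infer_instance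

-- ===== CLAIM (what is proved, stated in full; the proofs are below) =====
def Claim_equal_pos_tag : Prop := ∀ (tokens : List String), Dom_pos_tag tokens → Pre_pos_tag tokens → Spec_pos_tag tokens (pos_tag tokens)

-- ===== LEMMAS AND PROOFS =====

-- A's per-token tag, read off its elif chain
def tagA (token : String) : String :=
  if posDict.contains (PySem.Str.lower token) then posDict.getD (PySem.Str.lower token) ""
  else if PySem.Str.strIsdigit token then "CD"
  else if PySem.Str.endswith token "ing" then "VBG"
  else if PySem.Str.endswith token "ed" then "VBD"
  else if PySem.Str.endswith token "ly" then "RB"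
  else if PySem.Str.endswith token "s" && decide (3 < PySem.Str.len token) then "NNS"
  else
    match PySem.Str.pyGet? token 0 with
    | some c => if PySem.Chars.isupper c then "NNP" else "NN"
    | none => "NN"

-- A's fold appends one pair per token
theorem pos_tag_go (tokens : List String) (acc : List (String × String)) :
    tokens.foldl (fun tagged token =>
      let token_lower := PySem.Str.lower token
      if posDict.contains token_lower then
        tagged ++ [(token, posDict.getD token_lower "")]
      else if PySem.Str.strIsdigit token then
        tagged ++ [(token, "CD")]
      else if PySem.Str.endswith token "ing" then
        tagged ++ [(token, "VBG")]
      else if PySem.Str.endswith token "ed" then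
        tagged ++ [(token, "VBD")]
      else if PySem.Str.endswith token "ly" then
        tagged ++ [(token, "RB")]
      else if PySem.Str.endswith token "s" && decide (3 < PySem.Str.len token) then
        tagged ++ [(token, "NNS")]
      else
        match PySem.Str.pyGet? token 0 with
        | some c => if PySem.Chars.isupper c then tagged ++ [(token, "NNP")]
                    else tagged ++ [(token, "NN")]
        | none => tagged ++ [(token, "NN")]) acc
    = acc ++ tokens.map (fun token => (token, tagA token)) := by
  induction tokens generalizing acc with
  | nil => simp
  | cons t rest ih =>
    rw [List.foldl_cons, ih]
    have hstep : (let token_lower := PySem.Str.lower t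
      if posDict.contains token_lower then
        acc ++ [(t, posDict.getD token_lower "")]
      else if PySem.Str.strIsdigit t then acc ++ [(t, "CD")]
      else if PySem.Str.endswith t "ing" then acc ++ [(t, "VBG")]
      else if PySem.Str.endswith t "ed" then acc ++ [(t, "VBD")]
      else if PySem.Str.endswith t "ly" then acc ++ [(t, "RB")]
      else if PySem.Str.endswith t "s" && decide (3 < PySem.Str.len t) then acc ++ [(t, "NNS")]
      else
        match PySem.Str.pyGet? t 0 with
        | some c => if PySem.Chars.isupper c then acc ++ [(t, "NNP")] else acc ++ [(t, "NN")]
        | none => acc ++ [(t, "NN")]) = acc ++ [(t, tagA t)] := by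
      simp only [tagA]
      split_ifs <;> try rfl
      cases PySem.Str.pyGet? t 0 with
      | none => rfl
      | some c => by_cases hc : PySem.Chars.isupper c = true <;> simp [hc]
    rw [hstep]
    simp

-- fusing one overlay pass with a map-shaped tags list
theorem zip_map_fuse {α β γ : Type} (xs : List α) (g : α → β) (f : α × β → γ) :
    ((xs.zip (xs.map g)).map f) = xs.map (fun t => f (t, g t)) := by
  induction xs with
  | nil => rfl
  | cons x rest ih => simp [ih]

theorem zip_self_map {α β : Type} (xs : List α) (g : α → β) :
    xs.zip (xs.map g) = xs.map (fun t => (t, g t)) := by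
  induction xs with
  | nil => rfl
  | cons x rest ih => simp [ih]

-- per-token: B's fused overlay chain computes A's tag
theorem tag_agree (t : String) :
    (posDict.get? (PySem.Str.lower t)).getD
      (if PySem.Str.strIsdigit t then "CD"
       else if PySem.Str.endswith t "ing" then "VBG"
       else if PySem.Str.endswith t "ed" then "VBD"
       else if PySem.Str.endswith t "ly" then "RB"
       else if PySem.Str.endswith t "s" && decide (3 < PySem.Str.len t) then "NNS"
       else if (match PySem.Str.pyGet? t 0 with
                | some c => PySem.Chars.isupper c
                | none => false) then "NNP" else "NN")
    = tagA t := by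
  simp only [tagA, PySem.Dict.getD]
  rw [PySem.Dict.contains_eq_isSome_get?]
  cases hd : posDict.get? (PySem.Str.lower t) with
  | some v => simp
  | none =>
    simp only [Option.getD_none, Option.isSome_none, Bool.false_eq_true, if_false]
    split_ifs <;> try rfl
    all_goals cases hg : PySem.Str.pyGet? t 0 <;> simp_all

-- ===== VERDICT (by name: the statement is the Claim_ definition above) =====
theorem pos_tag_spec : Claim_equal_pos_tag := by
  intro tokens _ _
  unfold Spec_pos_tag pos_tag pos_tag_alt
  rw [pos_tag_go tokens []]
  simp only [posOverlays, List.foldl_cons, List.foldl_nil, List.nil_append]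
  rw [zip_map_fuse, zip_map_fuse, zip_map_fuse, zip_map_fuse, zip_map_fuse, zip_map_fuse,
      zip_map_fuse, zip_self_map]
  refine (List.map_congr_left fun t _ => ?_).symm
  simp only []
  exact congrArg (Prod.mk t) (tag_agree t)
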